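-- pv_equiv track=rewrite | github.com/QuBenhao/LeetCode | problems/problems_3814/solution.py | maxCapacity
-- ===== SOURCE A (Python) =====
-- from typing import List
--
-- from bisect import bisect_left
--
-- def maxCapacity(costs: List[int], capacity: List[int], budget: int) -> int:
--     arr = [(cost, cap) for cost, cap in zip(costs, capacity) if cost < budget]
--     arr.sort()
--     pre_max = [0] * (len(arr) + 1)
--     ans = 0
--     for i, (cost, cap) in enumerate(arr):
--         # i作为第二台的最优取值
--         j = bisect_left(range(i), budget - cost, key=lambda x: arr[x][0])
--         ans = max(ans, pre_max[j] + cap) # 前缀j这里相当于取arr中上式j的前一个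
--         pre_max[i + 1] = max(pre_max[i], cap)
--     return ans
-- ===== SOURCE B (Python) =====
-- def maxCapacity(costs, capacity, budget):
--     cand = [(c, cap) for c, cap in zip(costs, capacity) if c < budget]
--     ans = 0
--     while cand:
--         ci, pi = cand[0]
--         cand = cand[1:]
--         if pi > ans:
--             ans = pi
--         for cj, pj in cand:
--             if ci + cj < budget and pi + pj > ans:
--                 ans = pi + pj
--     return ans
-- ===== Notes on version B (the rewrite author's own statement) =====
-- stated objective: simpler
-- what changed: A sorts the affordable machines, keeps a running prefix-max of capacities and binary-searches (bisect_left) the partner cutoff for each machine; B drops sorting, prefix arrays and binary search entirely and just scans all unordered pairs of affordable machines (plus each machine alone, matching A's pre_max[0]=0 baseline), keeping a running maximum.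
import Mathlib
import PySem

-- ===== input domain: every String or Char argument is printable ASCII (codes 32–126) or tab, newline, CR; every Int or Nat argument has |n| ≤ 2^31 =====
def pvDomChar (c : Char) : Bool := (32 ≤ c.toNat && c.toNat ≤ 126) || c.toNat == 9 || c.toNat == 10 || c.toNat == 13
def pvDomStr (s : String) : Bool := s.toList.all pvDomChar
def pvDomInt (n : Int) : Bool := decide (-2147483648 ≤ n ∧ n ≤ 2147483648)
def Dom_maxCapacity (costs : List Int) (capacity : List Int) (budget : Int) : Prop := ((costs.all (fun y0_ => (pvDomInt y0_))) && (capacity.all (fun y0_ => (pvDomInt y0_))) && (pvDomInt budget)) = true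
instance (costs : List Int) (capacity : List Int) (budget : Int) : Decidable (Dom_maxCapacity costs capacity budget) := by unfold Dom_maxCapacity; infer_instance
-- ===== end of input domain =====

-- B replaces A's sort + prefix-max + bisect_left machinery by a plain scan over all
-- unordered pairs of affordable machines (objective: simpler; B is O(n^2) vs A's O(n log n)).

-- ===== PORT A =====
-- Loop body of A's `for i, (cost, cap) in enumerate(arr)`; `bisect_left(range(i), budget-cost,
-- key=lambda x: arr[x][0])` is bisect_left over the list of keys arr[x][0], x in range(i),
-- i.e. over (arr.take i).map Prod.fst (PySem.List.bisectLeft is exactly bisect_left).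
def aStep (budget : Int) (arr : List (Int × Int)) (st : List Int × Int) (p : (Int × Int) × Nat) : List Int × Int :=
  let cost := p.1.1
  let cap := p.1.2
  let i := p.2
  let j := PySem.List.bisectLeft ((arr.take i).map Prod.fst) (budget - cost)
  let ans := max st.2 (st.1.getD j 0 + cap)
  let pre := st.1.set (i + 1) (max (st.1.getD i 0) cap)
  (pre, ans)

-- arr.sort() on (cost, cap) tuples is Python's lexicographic tuple sort = PySem.List.sorted2;
-- enumerate(arr) carries the nonnegative index i, ported as List.zipIdx ((element, index) pairs);
-- pre_max reads/writes are always in range (j ≤ i < len(arr)+1), so getD/set are exact.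
def maxCapacity (costs : List Int) (capacity : List Int) (budget : Int) : Int :=
  let arr := PySem.List.sorted2 ((costs.zip capacity).filter (fun p => decide (p.1 < budget))) Prod.fst Prod.snd false
  let n := arr.length
  ((arr.zipIdx).foldl (aStep budget arr) (List.replicate (n + 1) 0, 0)).2

-- ===== PORT B =====
-- Inner `for cj, pj in cand: if ci + cj < budget and pi + pj > ans: ans = pi + pj`.
def altInner (budget ci pi : Int) (rest : List (Int × Int)) (ans : Int) : Int :=
  rest.foldl (fun a q => if ci + q.1 < budget ∧ a < pi + q.2 then pi + q.2 else a) ans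

-- Outer `while cand:` loop peeling the head machine off.
def altOuter (budget : Int) : List (Int × Int) → Int → Int
  | [], ans => ans
  | (c, p) :: rest, ans => altOuter budget rest (altInner budget c p rest (if ans < p then p else ans))

def maxCapacity_alt (costs : List Int) (capacity : List Int) (budget : Int) : Int :=
  altOuter budget ((costs.zip capacity).filter (fun p => decide (p.1 < budget))) 0

-- ===== PRECONDITION & SPEC =====
def Spec_maxCapacity (costs : List Int) (capacity : List Int) (budget : Int) (out : Int) : Prop := out = maxCapacity_alt costs capacity budget
instance (costs : List Int) (capacity : List Int) (budget : Int) (out : Int) : Decidable (Spec_maxCapacity costs capacity budget out) := by unfold Spec_maxCapacity; infer_instance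

-- ===== CLAIM (what is proved, stated in full; the proofs are below) =====
def Claim_equal_maxCapacity : Prop := ∀ (costs : List Int) (capacity : List Int) (budget : Int), Dom_maxCapacity costs capacity budget → Spec_maxCapacity costs capacity budget (maxCapacity costs capacity budget)

-- ===== LEMMAS AND PROOFS =====

-- The candidate values both programs maximise over: every capacity alone, and every
-- unordered pair of distinct affordable machines whose combined cost is under budget.
def pairCands (b : Int) : List (Int × Int) → List Int
  | [] => []
  | e :: rest => ((rest.filter (fun q => decide (e.1 + q.1 < b))).map (fun q => e.2 + q.2)) ++ pairCands b rest

def allCands (b : Int) (l : List (Int × Int)) : List Int := l.map Prod.snd ++ pairCands b l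

def mx (xs : List Int) : Int := xs.foldl max 0

-- generic fold-of-max facts
lemma foldl_max_max (ys : List Int) (a b : Int) : ys.foldl max (max a b) = max a (ys.foldl max b) := by
  induction ys generalizing b with
  | nil => rfl
  | cons y t ih => simpa [max_assoc] using ih (max b y)

lemma foldl_max_add (ys : List Int) (a c : Int) : ys.foldl max a + c = (ys.map (· + c)).foldl max (a + c) := by
  induction ys generalizing a with
  | nil => rfl
  | cons y t ih => simpa [max_add_add_right] using ih (max a y)

lemma mx_perm {xs ys : List Int} (h : xs.Perm ys) : mx xs = mx ys := h.foldl_eq 0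

-- sorted2 with first-component primary key is sorted on first components
lemma insertBy_pairwise_fst (x : Int × Int) (l : List (Int × Int))
    (hl : l.Pairwise (fun a b => a.1 ≤ b.1)) :
    (PySem.List.insertBy (fun a b : Int × Int => decide (a.1 < b.1) || !decide (b.1 < a.1) && decide (a.2 < b.2)) x l).Pairwise (fun a b => a.1 ≤ b.1) := by
  induction l with
  | nil => simp [PySem.List.insertBy]
  | cons y ys ih =>
    rw [List.pairwise_cons] at hl
    rw [show PySem.List.insertBy (fun a b : Int × Int => decide (a.1 < b.1) || !decide (b.1 < a.1) && decide (a.2 < b.2)) x (y :: ys)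
        = if (decide (x.1 < y.1) || !decide (y.1 < x.1) && decide (x.2 < y.2)) = true then x :: y :: ys
          else y :: PySem.List.insertBy (fun a b : Int × Int => decide (a.1 < b.1) || !decide (b.1 < a.1) && decide (a.2 < b.2)) x ys from rfl]
    by_cases h : (decide (x.1 < y.1) || !decide (y.1 < x.1) && decide (x.2 < y.2)) = true
    · rw [if_pos h]
      simp only [Bool.or_eq_true, Bool.and_eq_true, Bool.not_eq_eq_eq_not, Bool.not_true,
        decide_eq_true_eq, decide_eq_false_iff_not] at h
      have hxy : x.1 ≤ y.1 := by omega
      refine List.pairwise_cons.mpr ⟨fun z hz => ?_, List.pairwise_cons.mpr hl⟩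
      rcases List.mem_cons.mp hz with rfl | hz
      · exact hxy
      · exact le_trans hxy (hl.1 z hz)
    · rw [if_neg h]
      simp only [Bool.or_eq_true, Bool.and_eq_true, Bool.not_eq_eq_eq_not, Bool.not_true,
        decide_eq_true_eq, decide_eq_false_iff_not, not_or, not_and] at h
      have hyx : y.1 ≤ x.1 := by omega
      refine List.pairwise_cons.mpr ⟨fun z hz => ?_, ih hl.2⟩
      rcases (PySem.List.mem_insertBy _ _ _ _).mp hz with rfl | hz
      · exact hyx
      · exact hl.1 z hz

lemma foldl_insertBy_pairwise (xs acc : List (Int × Int))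
    (h : acc.Pairwise (fun a b => a.1 ≤ b.1)) :
    (xs.foldl (fun acc x => PySem.List.insertBy (fun a b : Int × Int => decide (a.1 < b.1) || !decide (b.1 < a.1) && decide (a.2 < b.2)) x acc) acc).Pairwise (fun a b => a.1 ≤ b.1) := by
  induction xs generalizing acc with
  | nil => exact h
  | cons x t ih => exact ih _ (insertBy_pairwise_fst x acc h)

lemma sorted2_fst_pairwise (xs : List (Int × Int)) :
    (PySem.List.sorted2 xs Prod.fst Prod.snd false).Pairwise (fun a b => a.1 ≤ b.1) := by
  simpa [PySem.List.sorted2] using foldl_insertBy_pairwise xs [] (by simp)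

-- pairCands is permutation-invariant (as a multiset)
lemma pairCands_perm (b : Int) {l l' : List (Int × Int)} (h : l.Perm l') :
    (pairCands b l).Perm (pairCands b l') := by
  induction h with
  | nil => rfl
  | cons x h ih =>
    simp only [pairCands]
    exact ((h.filter _).map _).append ih
  | swap x y l =>
    simp only [pairCands, List.filter_cons]
    have hc : decide (y.1 + x.1 < b) = decide (x.1 + y.1 < b) := by
      rw [decide_eq_decide]; omega
    rw [hc]
    by_cases hxy : x.1 + y.1 < b
    · simp only [hxy, decide_true, if_pos, List.map_cons, List.cons_append]
      have hv : y.2 + x.2 = x.2 + y.2 := by ring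
      rw [hv]
      exact (List.Perm.cons _ (by simpa [List.append_assoc] using
        List.perm_append_comm_assoc (List.map (fun q => y.2 + q.2) (List.filter (fun q => decide (y.1 + q.1 < b)) l)) (List.map (fun q => x.2 + q.2) (List.filter (fun q => decide (x.1 + q.1 < b)) l)) (pairCands b l)))
    · simp only [hxy, decide_false, if_neg, Bool.false_eq_true, not_false_iff]
      simpa [List.append_assoc] using
        List.perm_append_comm_assoc (List.map (fun q => y.2 + q.2) (List.filter (fun q => decide (y.1 + q.1 < b)) l)) (List.map (fun q => x.2 + q.2) (List.filter (fun q => decide (x.1 + q.1 < b)) l)) (pairCands b l)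
  | trans _ _ ih1 ih2 => exact ih1.trans ih2

lemma perm_shuffle (F P N : List Int) (v : Int) :
    ((F ++ [v]) ++ (P ++ N)).Perm ((F ++ P) ++ (v :: N)) := by
  simpa [List.append_assoc] using List.Perm.append_left F (List.perm_append_comm_assoc [v] P N)

lemma pairCands_append_singleton (b : Int) (l : List (Int × Int)) (e : Int × Int) :
    (pairCands b (l ++ [e])).Perm
      (pairCands b l ++ (l.filter (fun q => decide (q.1 + e.1 < b))).map (fun q => q.2 + e.2)) := by
  induction l with
  | nil => simp [pairCands]
  | cons x l ih =>
    simp only [List.cons_append, pairCands, List.filter_append, List.map_append, List.filter_cons]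
    by_cases h : x.1 + e.1 < b
    · simp only [h, decide_true, if_pos, List.filter_nil, List.map_cons, List.map_nil]
      have h1 := List.Perm.append_left
        (List.map (fun q => x.2 + q.2) (List.filter (fun q => decide (x.1 + q.1 < b)) l) ++ [x.2 + e.2]) ih
      exact h1.trans (perm_shuffle _ _ _ _)
    · simp only [h, decide_false, Bool.false_eq_true, if_neg, not_false_iff, List.filter_nil,
        List.map_nil, List.append_nil]
      have h1 := List.Perm.append_left
        (List.map (fun q => x.2 + q.2) (List.filter (fun q => decide (x.1 + q.1 < b)) l)) ih
      exact h1.trans (by simp [List.append_assoc])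

-- B computes the running max over allCands
lemma altInner_eq (b ci pi : Int) (rest : List (Int × Int)) (a : Int) :
    altInner b ci pi rest a = ((rest.filter (fun q => decide (ci + q.1 < b))).map (fun q => pi + q.2)).foldl max a := by
  induction rest generalizing a with
  | nil => rfl
  | cons q t ih =>
    have hstep : altInner b ci pi (q :: t) a
        = altInner b ci pi t (if ci + q.1 < b ∧ a < pi + q.2 then pi + q.2 else a) := rfl
    by_cases h : ci + q.1 < b
    · have hval : (if ci + q.1 < b ∧ a < pi + q.2 then pi + q.2 else a) = max a (pi + q.2) := by
        simp only [h, true_and]; omega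
      rw [hstep, hval, ih, List.filter_cons]
      simp [h]
    · have hval : (if ci + q.1 < b ∧ a < pi + q.2 then pi + q.2 else a) = a := by simp [h]
      rw [hstep, hval, ih, List.filter_cons]
      simp [h]

lemma altOuter_eq (b : Int) (l : List (Int × Int)) (a : Int) :
    altOuter b l a = (allCands b l).foldl max a := by
  induction l generalizing a with
  | nil => simp [altOuter, allCands, pairCands]
  | cons x rest ih =>
    obtain ⟨c, p⟩ := x
    have hm : (if a < p then p else a) = max a p := by omega
    rw [show altOuter b ((c, p) :: rest) a
        = altOuter b rest (altInner b c p rest (if a < p then p else a)) from rfl, hm,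
      altInner_eq, ih, ← List.foldl_append]
    have hfold : ∀ (L : List Int), L.foldl max (max a p) = (p :: L).foldl max a := fun L => rfl
    rw [hfold]
    refine List.Perm.foldl_eq ?_ a
    show (p :: (_ ++ allCands b rest)).Perm (allCands b ((c, p) :: rest))
    simp only [allCands, pairCands, List.map_cons, List.cons_append]
    have hsh := List.perm_append_comm_assoc
      (List.map (fun q => p + q.2) (List.filter (fun q => decide (c + q.1 < b)) rest))
      (List.map Prod.snd rest) (pairCands b rest)
    exact List.Perm.cons _ (by simpa [List.append_assoc] using hsh)

-- step arithmetic of A's loop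
lemma mx_step (A0 P0 zs : List Int) (cap : Int) :
    max (mx (A0 ++ P0)) ((mx zs) + cap) = mx (A0 ++ [cap] ++ (P0 ++ zs.map (· + cap))) := by
  unfold mx
  rw [foldl_max_add zs 0 cap, zero_add]
  simp only [List.foldl_append, List.foldl_cons, List.foldl_nil]
  rw [max_comm (List.foldl max (0:Int) A0) cap, foldl_max_max P0 cap (List.foldl max 0 A0),
    max_comm cap (List.foldl max (List.foldl max (0:Int) A0) P0),
    foldl_max_max (zs.map (· + cap)) (List.foldl max (List.foldl max (0:Int) A0) P0) cap]

-- the affordable prefix cut by bisect_left: a predicate true exactly on a prefix filters to that prefix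
lemma filter_prefix_eq_take (s : List (Int × Int)) (i j : Nat) (p : Int × Int → Bool)
    (hij : j ≤ i) (hi : i ≤ s.length)
    (h1 : ∀ (k : Nat) (hk : k < s.length), k < j → p s[k] = true)
    (h2 : ∀ (k : Nat) (hk : k < s.length), j ≤ k → k < i → p s[k] = false) :
    (s.take i).filter p = s.take j := by
  have hsplit : s.take i = s.take j ++ (s.take i).drop j := by
    conv_lhs => rw [← List.take_append_drop j (s.take i)]
    rw [List.take_take, Nat.min_eq_left hij]
  rw [hsplit, List.filter_append]
  have hA : (s.take j).filter p = s.take j := by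
    rw [List.filter_eq_self]
    intro a ha
    obtain ⟨k, hk, rfl⟩ := List.mem_iff_getElem.mp ha
    have hkj : k < j := by simp [List.length_take] at hk; omega
    have hks : k < s.length := by simp [List.length_take] at hk; omega
    rw [List.getElem_take]
    exact h1 k hks hkj
  have hB : ((s.take i).drop j).filter p = [] := by
    rw [List.filter_eq_nil_iff]
    intro a ha
    obtain ⟨k, hk, rfl⟩ := List.mem_iff_getElem.mp ha
    have hki : j + k < i := by simp [List.length_take] at hk; omega
    have hks : j + k < s.length := by omega
    rw [List.getElem_drop, List.getElem_take]
    simp [h2 (j + k) hks (by omega) hki]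
  rw [hA, hB, List.append_nil]

-- A's loop invariant
lemma aLoop_invariant (b : Int) (s : List (Int × Int))
    (hs : s.Pairwise (fun a c => a.1 ≤ c.1)) (i : Nat) (hi : i ≤ s.length) :
    (((s.take i).zipIdx.foldl (aStep b s) (List.replicate (s.length + 1) 0, 0)).1.length = s.length + 1)
    ∧ (∀ k, k ≤ s.length →
        (((s.take i).zipIdx.foldl (aStep b s) (List.replicate (s.length + 1) 0, 0)).1.getD k 0
          = if k ≤ i then mx ((s.take k).map Prod.snd) else 0))
    ∧ ((s.take i).zipIdx.foldl (aStep b s) (List.replicate (s.length + 1) 0, 0)).2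
        = mx (allCands b (s.take i)) := by
  induction i with
  | zero =>
    refine ⟨by simp, fun k hk => ?_, by simp [allCands, pairCands, mx]⟩
    simp only [List.take_zero, List.zipIdx_nil, List.foldl_nil,
      List.getD_eq_getElem?_getD, List.getElem?_replicate]
    by_cases hk0 : k = 0
    · subst hk0; simp [mx]
    · simp [hk0, Nat.lt_succ_of_le hk]
  | succ i ih =>
    have hi' : i ≤ s.length := by omega
    have hlt : i < s.length := by omega
    obtain ⟨IH1, IH2, IH3⟩ := ih hi'
    have htake : s.take (i + 1) = s.take i ++ [s[i]] := by
      rw [List.take_add_one, List.getElem?_eq_getElem hlt]; rfl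
    have hzip : (s.take (i + 1)).zipIdx = (s.take i).zipIdx ++ [(s[i], i)] := by
      rw [htake, List.zipIdx_append]
      simp [List.length_take, Nat.min_eq_left hi']
    have hfold : (s.take (i + 1)).zipIdx.foldl (aStep b s) (List.replicate (s.length + 1) 0, 0)
        = aStep b s ((s.take i).zipIdx.foldl (aStep b s) (List.replicate (s.length + 1) 0, 0)) (s[i], i) := by
      rw [hzip, List.foldl_append]; rfl
    set st := (s.take i).zipIdx.foldl (aStep b s) (List.replicate (s.length + 1) 0, 0) with hst
    set ks := (s.take i).map Prod.fst with hks
    have hkslen : ks.length = i := by simp [hks, List.length_take, Nat.min_eq_left hi']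
    have hksort : ks.Pairwise (· ≤ ·) :=
      List.pairwise_map.mpr (List.Pairwise.sublist (List.take_sublist i s) hs)
    obtain ⟨hjle, hbelow, habove⟩ := PySem.List.bisectLeft_spec ks (b - s[i].1) hksort
    set j := PySem.List.bisectLeft ks (b - s[i].1) with hjdef
    have hji : j ≤ i := by omega
    have hkseq : ∀ (k : Nat) (hk : k < i), ks[k]'(by omega) = (s[k]'(by omega)).1 := by
      intro k hk
      simp [hks, List.getElem_map, List.getElem_take]
    have hstep : aStep b s st (s[i], i)
        = (st.1.set (i + 1) (max (st.1.getD i 0) s[i].2),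
           max st.2 (st.1.getD j 0 + s[i].2)) := rfl
    have hgetj : st.1.getD j 0 = mx ((s.take j).map Prod.snd) := by
      rw [IH2 j (by omega)]; simp [hji]
    have hgeti : st.1.getD i 0 = mx ((s.take i).map Prod.snd) := by
      rw [IH2 i (by omega)]; simp
    refine ⟨?_, fun k hk => ?_, ?_⟩
    · rw [hfold, hstep]; simpa using IH1
    · rw [hfold, hstep]
      rw [List.getD_eq_getElem?_getD, List.getElem?_set]
      by_cases hk1 : i + 1 = k
      · rw [if_pos hk1, if_pos (show i + 1 < st.1.length by omega), Option.getD_some]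
        subst hk1
        rw [hgeti, if_pos le_rfl, htake, List.map_append]
        simp [mx, List.foldl_append]
      · rw [if_neg hk1, ← List.getD_eq_getElem?_getD, IH2 k hk]
        by_cases hki : k ≤ i
        · rw [if_pos hki, if_pos (by omega)]
        · rw [if_neg hki, if_neg (by omega)]
    · rw [hfold, hstep]
      simp only
      rw [IH3, hgetj, htake]
      have hfilter : (s.take i).filter (fun q => decide (q.1 + (s[i]).1 < b)) = s.take j := by
        refine filter_prefix_eq_take s i j _ hji hi' ?_ ?_
        · intro k hkl hkj
          have := hbelow k (by omega) hkj
          rw [hkseq k (by omega)] at this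
          simpa using by omega
        · intro k hkl hjk hki
          have := habove k (by omega) hjk
          rw [hkseq k hki] at this
          simpa using by omega
      have hperm2 : (allCands b (s.take i ++ [s[i]])).Perm
          (((s.take i).map Prod.snd) ++ [(s[i]).2]
            ++ (pairCands b (s.take i) ++ ((s.take j).map Prod.snd).map (· + (s[i]).2))) := by
        have hpc := pairCands_append_singleton b (s.take i) s[i]
        rw [hfilter] at hpc
        have hmm : (s.take j).map (fun q => q.2 + (s[i]).2)
            = ((s.take j).map Prod.snd).map (· + (s[i]).2) := by simp [List.map_map]; rfl
        rw [hmm] at hpc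
        have : allCands b (s.take i ++ [s[i]])
            = ((s.take i).map Prod.snd ++ [(s[i]).2]) ++ pairCands b (s.take i ++ [s[i]]) := by
          unfold allCands
          rw [List.map_append]
          rfl
        rw [this]
        exact List.Perm.append_left _ hpc
      rw [mx_perm hperm2]
      exact mx_step ((s.take i).map Prod.snd) (pairCands b (s.take i)) ((s.take j).map Prod.snd) (s[i]).2

-- ===== VERDICT (by name: the statement is the Claim_ definition above) =====
theorem maxCapacity_spec : Claim_equal_maxCapacity := by
  intro costs capacity budget _
  unfold Spec_maxCapacity maxCapacity maxCapacity_alt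
  simp only
  set arr0 := (costs.zip capacity).filter (fun p => decide (p.1 < budget)) with harr0
  set s := PySem.List.sorted2 arr0 Prod.fst Prod.snd false with hsdef
  have hperm : s.Perm arr0 := PySem.List.sorted2_perm arr0 Prod.fst Prod.snd false
  have hsort := sorted2_fst_pairwise arr0
  have hinv := (aLoop_invariant budget s (by rw [← hsdef] at hsort; exact hsort) s.length le_rfl).2.2
  rw [List.take_length] at hinv
  rw [hinv, altOuter_eq]
  have hpermC : (allCands budget s).Perm (allCands budget arr0) :=
    List.Perm.append (hperm.map Prod.snd) (pairCands_perm budget hperm)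
  exact mx_perm hpermC
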